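-- pv_equiv track=rewrite | github.com/deltaforge-org/delta-forge-demos | demos/chart/enrich.py | drop_orphan_trailing_banners
-- ===== SOURCE A (Python) =====
-- def drop_orphan_trailing_banners(sql: str) -> str:
--     """Drop comment-only trailing blocks left behind after removing DETECT/GRANT.
--
--     Any region of the form ``-- --...\\n-- <title>\\n-- --...\\n`` (or its
--     single-line-title variant) that is followed only by whitespace until EOF
--     is dropped, because it annotates content that no longer exists.
--     """
--     lines = sql.split('\n')
--     # Find the last non-blank, non-comment line
--     last_sql_idx = -1
--     for i, line in enumerate(lines):
--         stripped = line.strip()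
--         if stripped and not stripped.startswith('--'):
--             last_sql_idx = i
--     if last_sql_idx < 0:
--         return sql
--     # Everything after last_sql_idx that is purely comments/blanks can be dropped
--     return '\n'.join(lines[: last_sql_idx + 1])
-- ===== SOURCE B (Python) =====
-- def _meaningful(line):
--     stripped = line.strip()
--     return bool(stripped) and not stripped.startswith('--')
--
--
-- def drop_orphan_trailing_banners(sql: str) -> str:
--     # Scan backwards from the end: pop trailing blank/comment-only lines.
--     lines = sql.split('\n')
--     keep = len(lines)
--     while keep and not _meaningful(lines[keep - 1]):
--         keep -= 1
--     if keep == 0: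
--         return sql
--     return '\n'.join(lines[:keep])
-- ===== Notes on version B (the rewrite author's own statement) =====
-- stated objective: alternative
-- what changed: B scans backwards from the last line and stops at the first meaningful line, instead of A's full forward scan that records the last meaningful index; it then joins the kept prefix.
import Mathlib
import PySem

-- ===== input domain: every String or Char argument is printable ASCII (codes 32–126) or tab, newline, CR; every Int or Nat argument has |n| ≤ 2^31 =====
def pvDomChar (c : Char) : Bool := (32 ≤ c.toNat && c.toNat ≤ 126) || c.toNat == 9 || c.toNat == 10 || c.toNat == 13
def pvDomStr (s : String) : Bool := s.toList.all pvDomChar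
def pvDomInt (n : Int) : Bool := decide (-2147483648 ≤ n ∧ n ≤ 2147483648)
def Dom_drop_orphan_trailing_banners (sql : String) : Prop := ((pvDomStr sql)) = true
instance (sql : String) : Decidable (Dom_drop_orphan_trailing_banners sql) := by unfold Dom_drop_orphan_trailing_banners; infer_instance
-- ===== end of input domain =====

-- B replaces A's full forward scan (recording the last meaningful line's index) by a
-- backward scan from the end that stops at the first meaningful line (objective: alternative).

-- ===== PORT A =====
def drop_orphan_trailing_banners (sql : String) : String :=
  let lines := (PySem.Str.split? sql "\n").getD []   -- sep "\n" ≠ "", so split? is always some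
  let last_sql_idx : Int :=
    (PySem.List.enumerate lines 0).foldl
      (fun acc p =>
        let stripped := PySem.Str.strip p.2
        if (stripped != "") && !(PySem.Str.startswith stripped "--") then p.1 else acc)
      (-1)
  if last_sql_idx < 0 then sql
  else PySem.Str.join "\n" (PySem.List.slice lines none (some (last_sql_idx + 1)))

-- ===== PORT B =====
def pvMeaningful (line : String) : Bool :=
  let stripped := PySem.Str.strip line
  (stripped != "") && !(PySem.Str.startswith stripped "--")

-- the `while keep and not _meaningful(lines[keep-1]): keep -= 1` loop of Source B
def pvShrink (lines : List String) : Nat → Nat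
  | 0 => 0
  | k+1 => if pvMeaningful (lines.getD k "") then k+1 else pvShrink lines k

def drop_orphan_trailing_banners_alt (sql : String) : String :=
  let lines := (PySem.Str.split? sql "\n").getD []   -- sep "\n" ≠ "", so split? is always some
  let keep := pvShrink lines lines.length
  if keep = 0 then sql
  else PySem.Str.join "\n" (lines.take keep)

-- ===== PRECONDITION & SPEC =====
def Spec_drop_orphan_trailing_banners (sql : String) (out : String) : Prop := out = drop_orphan_trailing_banners_alt sql
instance (sql : String) (out : String) : Decidable (Spec_drop_orphan_trailing_banners sql out) := by unfold Spec_drop_orphan_trailing_banners; infer_instance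

-- ===== CLAIM (what is proved, stated in full; the proofs are below) =====
def Claim_equal_drop_orphan_trailing_banners : Prop := ∀ (sql : String), Dom_drop_orphan_trailing_banners sql → Spec_drop_orphan_trailing_banners sql (drop_orphan_trailing_banners sql)

-- ===== LEMMAS AND PROOFS =====

-- appending a line past index k does not change the backward scan below k
lemma pvShrink_append (ls : List String) (x : String) :
    ∀ k, k ≤ ls.length → pvShrink (ls ++ [x]) k = pvShrink ls k := by
  intro k
  induction k with
  | zero => intro _; rfl
  | succ k ih =>
    intro hk
    have hlt : k < ls.length := hk
    simp [pvShrink, List.getElem?_append_left hlt, ih (Nat.le_of_lt hlt)]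

-- A's forward fold computes exactly B's backward scan, shifted by one
lemma pvF_eq (ls : List String) :
    (PySem.List.enumerate ls 0).foldl
      (fun acc p =>
        let stripped := PySem.Str.strip p.2
        if (stripped != "") && !(PySem.Str.startswith stripped "--") then p.1 else acc)
      (-1)
    = (pvShrink ls ls.length : Int) - 1 := by
  induction ls using List.reverseRecOn with
  | nil => rfl
  | append_singleton ls x ih =>
    rw [PySem.List.enumerate_append, List.foldl_append, ih]
    show (if pvMeaningful x then (0 + (ls.length : Int)) else (pvShrink ls ls.length : Int) - 1)
        = (pvShrink (ls ++ [x]) (ls ++ [x]).length : Int) - 1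
    have hlen : (ls ++ [x]).length = ls.length + 1 := by simp
    rw [hlen]
    show _ = (pvShrink (ls ++ [x]) (ls.length + 1) : Int) - 1
    have hget : (ls ++ [x]).getD ls.length "" = x := by
      simp [List.getD]
    rw [pvShrink]
    rw [hget, pvShrink_append ls x ls.length (le_refl _)]
    by_cases h : pvMeaningful x = true <;> simp [h]

-- ===== VERDICT (by name: the statement is the Claim_ definition above) =====
theorem drop_orphan_trailing_banners_spec : Claim_equal_drop_orphan_trailing_banners := by
  intro sql _
  show drop_orphan_trailing_banners sql = drop_orphan_trailing_banners_alt sql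
  unfold drop_orphan_trailing_banners drop_orphan_trailing_banners_alt
  simp only [pvF_eq]
  set lines := (PySem.Str.split? sql "\n").getD [] with hl
  set keep := pvShrink lines lines.length with hk
  by_cases h0 : keep = 0
  · simp [h0]
  · have hpos : 0 < keep := Nat.pos_of_ne_zero h0
    have h1 : ¬ ((keep : Int) - 1 < 0) := by omega
    rw [if_neg h1, if_neg h0]
    have : (keep : Int) - 1 + 1 = (keep : Int) := by ring
    rw [this, PySem.List.slice_to lines (by positivity)]
    simp
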